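-- pv_equiv track=rewrite | github.com/Gourave/tictactoe_python | Ai.py | check_num_human_in_row
-- ===== SOURCE A (Python) =====
-- def check_num_human_in_row(board, human, computer):
--     # Check for the number of humans in a certain row
--     for row in range(0, len(board)):
--         num_human = 0
--         for col in range(0, len(board)):
--             if human == board[row][col]:
--                 num_human += 1
--                 if num_human >= 2:
--                     return True
--             elif computer == board[row][col]:
--                 num_human = 0
--     return False
-- ===== SOURCE B (Python) =====
-- def check_num_human_in_row(board, human, computer):
--     n = len(board)
--     for r in range(n):
--         cells = [board[r][c] for c in range(n)]
--         # split the row into maximal segments separated by computer cells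
--         # (human-first precedence: a cell equal to human is never a delimiter)
--         segments = []
--         cur = []
--         for x in cells:
--             if human != x and computer == x:
--                 segments.append(cur)
--                 cur = []
--             else:
--                 cur.append(x)
--         segments.append(cur)
--         if any(sum(1 for x in seg if x == human) >= 2 for seg in segments):
--             return True
--     return False
-- ===== Notes on version B (the rewrite author's own statement) =====
-- stated objective: alternative
-- what changed: B materialises each row's first n cells, splits them into maximal segments delimited by computer marks (human-first precedence), and asks whether any segment holds two human marks, instead of A's inline reset-on-computer running counter with early return.
-- outside the precondition, e.g. on check_num_human_in_row([['X', 'X'], ['a', 'b', 'c'], ['a', 'b', 'c']], 'X', 'O'): A returns True, B raises IndexError; on check_num_human_in_row([['X', 'X'], ['X']], 'X', 'O'): A returns True, B returns True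
import Mathlib
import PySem

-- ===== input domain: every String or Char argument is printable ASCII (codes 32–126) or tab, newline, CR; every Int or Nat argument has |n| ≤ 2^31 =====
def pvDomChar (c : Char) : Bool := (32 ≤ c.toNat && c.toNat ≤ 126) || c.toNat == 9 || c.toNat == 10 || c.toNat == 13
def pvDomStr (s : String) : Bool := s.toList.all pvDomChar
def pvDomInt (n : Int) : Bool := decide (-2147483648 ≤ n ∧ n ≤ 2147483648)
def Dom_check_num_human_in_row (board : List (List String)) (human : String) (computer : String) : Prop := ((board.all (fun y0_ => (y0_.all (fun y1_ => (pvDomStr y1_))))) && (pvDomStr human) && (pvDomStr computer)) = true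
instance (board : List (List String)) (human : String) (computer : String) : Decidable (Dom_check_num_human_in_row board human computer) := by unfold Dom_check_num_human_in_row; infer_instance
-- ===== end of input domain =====

-- B replaces A's inline reset-on-computer running counter by a split-into-segments
-- pass: materialise the row's cells, cut at computer marks, count humans per segment.

-- ===== PORT A =====
-- inner loop over column indices, carrying num_human; early return True = result true
def pvAInner (human computer : String) (row : List String) : List Nat → Nat → Bool
  | [], _ => false
  | c :: cs, num =>
    let cell := (PySem.List.pyGet? row (Int.ofNat c)).getD ""
    if human == cell then
      if num + 1 ≥ 2 then true else pvAInner human computer row cs (num + 1)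
    else if computer == cell then pvAInner human computer row cs 0
    else pvAInner human computer row cs num

def pvAOuter (board : List (List String)) (human computer : String) : List Nat → Bool
  | [] => false
  | r :: rs =>
    let row := (PySem.List.pyGet? board (Int.ofNat r)).getD []
    if pvAInner human computer row (List.range board.length) 0 then true
    else pvAOuter board human computer rs

def check_num_human_in_row (board : List (List String)) (human : String) (computer : String) : Bool :=
  pvAOuter board human computer (List.range board.length)

-- ===== PORT B =====
-- split cells into maximal segments delimited by computer marks (human-first precedence)
def pvBSplit (human computer : String) : List String → List String → List (List String)
  | [], cur => [cur]
  | x :: xs, cur =>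
    if human != x && computer == x then cur :: pvBSplit human computer xs []
    else pvBSplit human computer xs (cur ++ [x])

def pvBRow (human computer : String) (cells : List String) : Bool :=
  (pvBSplit human computer cells []).any (fun seg => decide (2 ≤ seg.countP (fun x => x == human)))

def pvBOuter (board : List (List String)) (human computer : String) : List Nat → Bool
  | [] => false
  | r :: rs =>
    let cells := (List.range board.length).map
      (fun c => (PySem.List.pyGet? ((PySem.List.pyGet? board (Int.ofNat r)).getD []) (Int.ofNat c)).getD "")
    if pvBRow human computer cells then true
    else pvBOuter board human computer rs

def check_num_human_in_row_alt (board : List (List String)) (human : String) (computer : String) : Bool :=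
  pvBOuter board human computer (List.range board.length)

-- ===== PRECONDITION & SPEC =====
-- Pre_ excludes boards with a row shorter than len(board): there A raises IndexError
-- (or, on rows before the short one, may return True before reaching it).
def Pre_check_num_human_in_row (board : List (List String)) (human : String) (computer : String) : Prop :=
  ∀ row ∈ board, board.length ≤ row.length
instance (board : List (List String)) (human : String) (computer : String) : Decidable (Pre_check_num_human_in_row board human computer) := by unfold Pre_check_num_human_in_row; infer_instance

def pvWitness_check_num_human_in_row : List (List String) × String × String :=
  ([["X", "O"], ["O", "X"]], "X", "O")

def Spec_check_num_human_in_row (board : List (List String)) (human : String) (computer : String) (out : Bool) : Prop := out = check_num_human_in_row_alt board human computer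
instance (board : List (List String)) (human : String) (computer : String) (out : Bool) : Decidable (Spec_check_num_human_in_row board human computer out) := by unfold Spec_check_num_human_in_row; infer_instance

-- ===== CLAIM (what is proved, stated in full; the proofs are below) =====
def Claim_equal_check_num_human_in_row : Prop := ∀ (board : List (List String)) (human : String) (computer : String), Dom_check_num_human_in_row board human computer → Pre_check_num_human_in_row board human computer → Spec_check_num_human_in_row board human computer (check_num_human_in_row board human computer)

-- ===== LEMMAS AND PROOFS =====

-- if the carried segment already holds two humans, the split check is true
theorem pvBSplit_any_of_two (human computer : String) (cells cur : List String)
    (h : 2 ≤ cur.countP (fun x => x == human)) :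
    (pvBSplit human computer cells cur).any
        (fun seg => decide (2 ≤ seg.countP (fun x => x == human))) = true := by
  induction cells generalizing cur with
  | nil => simp [pvBSplit, h]
  | cons x xs ih =>
    simp only [pvBSplit]
    split
    · simp [h]
    · exact ih (cur ++ [x]) (by simp [List.countP_append]; omega)

-- A's running-counter scan over column indices equals B's split-then-count on the
-- same fetched cells, relative to the humans already seen in the carried segment.
theorem pvScan_eq_split (human computer : String) (row : List String) (cols : List Nat)
    (cur : List String) (h : cur.countP (fun x => x == human) ≤ 1) :
    pvAInner human computer row cols (cur.countP (fun x => x == human)) =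
      (pvBSplit human computer
          (cols.map (fun c => (PySem.List.pyGet? row (Int.ofNat c)).getD "")) cur).any
        (fun seg => decide (2 ≤ seg.countP (fun x => x == human))) := by
  induction cols generalizing cur with
  | nil =>
    simp only [pvAInner, List.map_nil, pvBSplit, List.any_cons, List.any_nil, Bool.or_false]
    have : ¬ (2 ≤ cur.countP (fun x => x == human)) := by omega
    simp [this]
  | cons c cs ih =>
    simp only [pvAInner, List.map_cons, pvBSplit]
    set cell := (PySem.List.pyGet? row (Int.ofNat c)).getD "" with hcell
    by_cases hh : human = cell
    · have hb : (human == cell) = true := beq_iff_eq.mpr hh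
      have hd : (human != cell && computer == cell) = false := by simp [hh]
      have hcnt : (cur ++ [cell]).countP (fun x => x == human) =
          cur.countP (fun x => x == human) + 1 := by
        simp [List.countP_append, hh]
      by_cases h2 : cur.countP (fun x => x == human) + 1 ≥ 2
      · simp only [hb, hd, if_true, Bool.false_eq_true, if_false, if_pos h2]
        exact (pvBSplit_any_of_two human computer _ _ (by omega)).symm
      · simp only [hb, hd, if_true, Bool.false_eq_true, if_false, if_neg h2]
        rw [← hcnt]
        exact ih (cur ++ [cell]) (by omega)
    · have hb : (human == cell) = false := by simp [hh]
      by_cases hcomp : computer = cell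
      · have hc : (computer == cell) = true := beq_iff_eq.mpr hcomp
        have hbne : (human != cell) = true := by simp [hh]
        simp only [hb, hc, hbne, Bool.true_and, Bool.false_eq_true, if_false, if_true,
          List.any_cons]
        have hlt : decide (2 ≤ cur.countP (fun x => x == human)) = false := by
          simp; omega
        rw [hlt, Bool.false_or,
          show (0 : Nat) = ([] : List String).countP (fun x => x == human) by simp]
        exact ih [] (by simp)
      · have hc : (computer == cell) = false := by simp [hcomp]
        have hcnt : (cur ++ [cell]).countP (fun x => x == human) =
            cur.countP (fun x => x == human) := by
          simp [List.countP_append]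
          intro hx; exact absurd hx.symm hh
        simp only [hb, hc, Bool.and_false, Bool.false_eq_true, if_false]
        rw [← hcnt]
        exact ih (cur ++ [cell]) (by omega)

theorem pvOuter_eq (board : List (List String)) (human computer : String) (rs : List Nat) :
    pvAOuter board human computer rs = pvBOuter board human computer rs := by
  induction rs with
  | nil => rfl
  | cons r rest ih =>
    simp only [pvAOuter, pvBOuter]
    have hrow : pvAInner human computer ((PySem.List.pyGet? board (Int.ofNat r)).getD [])
        (List.range board.length) 0 =
        pvBRow human computer ((List.range board.length).map
          (fun c => (PySem.List.pyGet? ((PySem.List.pyGet? board (Int.ofNat r)).getD []) (Int.ofNat c)).getD "")) := by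
      have := pvScan_eq_split human computer ((PySem.List.pyGet? board (Int.ofNat r)).getD [])
        (List.range board.length) [] (by simp)
      simpa [pvBRow] using this
    rw [hrow, ih]

-- ===== VERDICT (by name: the statement is the Claim_ definition above) =====
theorem check_num_human_in_row_spec : Claim_equal_check_num_human_in_row := by
  intro board human computer _ _
  unfold Spec_check_num_human_in_row check_num_human_in_row check_num_human_in_row_alt
  exact pvOuter_eq board human computer _
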